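-- pv_equiv track=rewrite | github.com/Thobla/AoC-2025 | day12_2.py | compute_face_angles
-- ===== SOURCE A (Python) =====
-- def compute_face_angles(garden, plant, width, height, grid):
--     garden_pos_angles = []
--     for pos in garden:
--         pos_angles = [False, False, False, False]
--         directions = [[1, 0], [-1, 0], [0, 1], [0, -1]]
--         for i in range(len(directions)):
--             dir = directions[i]
--             x = pos[0]
--             y = pos[1]
--             if x + dir[0] < 0 or y + dir[1] < 0 or x + dir[0] >= width or y + dir[1] >= height:
--                 pos_angles[i] = True
--             elif grid[y + dir[1]][x + dir[0]] != plant: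
--                 pos_angles[i] = True
--         garden_pos_angles.append(pos_angles)
--     return garden_pos_angles
-- ===== SOURCE B (Python) =====
-- def compute_face_angles(garden, plant, width, height, grid):
--     # Pass 1: the set of every in-bounds cell that holds this plant.
--     plant_cells = {(x, y)
--                    for y in range(min(height, len(grid)))
--                    for x in range(min(width, len(grid[y])))
--                    if grid[y][x] == plant}
--     # Pass 2: shift that whole set once per direction; a position is "covered"
--     # in direction d exactly when it lies in the plant set translated by -d.
--     safe = [{(x - dx, y - dy) for (x, y) in plant_cells}
--             for dx, dy in ((1, 0), (-1, 0), (0, 1), (0, -1))]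
--     # Pass 3: per garden position, four plain membership tests
--     # (no bounds branch, no neighbour arithmetic).
--     return [[pos not in s for s in safe] for pos in garden]
-- ===== Notes on version B (the rewrite author's own statement) =====
-- stated objective: alternative
-- what changed: B inverts the computation: instead of testing four neighbour offsets with a bounds/elif branch per position, it builds the set of plant-bearing cells in one grid pass, translates that whole set once per direction, and then answers each garden position by four plain set-membership tests with no per-position offset arithmetic or bounds check.
import Mathlib
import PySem

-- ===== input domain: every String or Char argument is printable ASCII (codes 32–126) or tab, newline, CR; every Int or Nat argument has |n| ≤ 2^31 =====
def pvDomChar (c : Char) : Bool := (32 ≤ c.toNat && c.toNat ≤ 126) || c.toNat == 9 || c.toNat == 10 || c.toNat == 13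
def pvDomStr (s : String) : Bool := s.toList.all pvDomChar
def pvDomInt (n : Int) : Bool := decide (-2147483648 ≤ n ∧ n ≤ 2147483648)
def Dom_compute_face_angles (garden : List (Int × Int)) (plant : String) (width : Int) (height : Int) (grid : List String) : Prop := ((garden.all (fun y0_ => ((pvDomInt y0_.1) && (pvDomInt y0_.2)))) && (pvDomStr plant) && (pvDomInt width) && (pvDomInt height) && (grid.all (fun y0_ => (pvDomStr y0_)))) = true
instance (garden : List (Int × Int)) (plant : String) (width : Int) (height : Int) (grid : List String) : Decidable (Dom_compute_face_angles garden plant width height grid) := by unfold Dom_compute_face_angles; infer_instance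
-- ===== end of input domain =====

-- B inverts the computation: one grid pass collects the set of plant cells, that set is
-- translated once per direction, and each garden position is answered by four plain
-- set-membership tests (no per-position bounds branch or neighbour arithmetic);
-- return-value equivalence is proved on Pre_ (A raises IndexError outside it).
-- Python '1-char != plant' is ported as comparison of the char's singleton list with plant.toList (exact).

-- ===== PORT A =====
def compute_face_angles (garden : List (Int × Int)) (plant : String) (width : Int) (height : Int) (grid : List String) : List (List Bool) :=
  garden.foldl (fun garden_pos_angles pos =>
    let directions : List (Int × Int) := [(1, 0), (-1, 0), (0, 1), (0, -1)]
    let pos_angles : List Bool :=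
      (PySem.List.pyRange 0 (PySem.List.len directions) 1).foldl (fun pa i =>
        let dir := PySem.List.pyGetD directions i (0, 0)
        let x := pos.1
        let y := pos.2
        if x + dir.1 < 0 ∨ y + dir.2 < 0 ∨ x + dir.1 ≥ width ∨ y + dir.2 ≥ height then
          PySem.List.pySetD pa i true
        else
          -- Python raises IndexError when either lookup fails; those inputs are outside Pre_
          match PySem.List.pyGet? grid (y + dir.2) with
          | none => pa
          | some row =>
            match PySem.Str.pyGet? row (x + dir.1) with
            | none => pa
            | some c => if [c] ≠ plant.toList then PySem.List.pySetD pa i true else pa)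
        [false, false, false, false]
    garden_pos_angles ++ [pos_angles]) []

-- ===== PORT B =====
def compute_face_angles_alt (garden : List (Int × Int)) (plant : String) (width : Int) (height : Int) (grid : List String) : List (List Bool) :=
  let plant_cells : PySem.Set (Int × Int) :=
    PySem.Set.ofList ((PySem.List.pyRange 0 (min height (PySem.List.len grid)) 1).flatMap (fun y =>
      (PySem.List.pyRange 0 (min width (PySem.Str.len (PySem.List.pyGetD grid y ""))) 1).filterMap (fun x =>
        if [PySem.List.pyGetD (PySem.List.pyGetD grid y "").toList x ' '] = plant.toList then some (x, y) else none)))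
  let safe : List (PySem.Set (Int × Int)) :=
    ([(1, 0), (-1, 0), (0, 1), (0, -1)] : List (Int × Int)).map (fun d =>
      PySem.Set.ofList (plant_cells.map (fun c => (c.1 - d.1, c.2 - d.2))))
  garden.map (fun pos => safe.map (fun s => !(PySem.Set.contains s pos)))

-- ===== PRECONDITION & SPEC =====
-- Pre_ excludes exactly the inputs on which A raises IndexError: some garden position has a
-- neighbour inside the declared width×height box but outside the actual grid (too few rows,
-- or a row shorter than width at the accessed column).
def Pre_compute_face_angles (garden : List (Int × Int)) (plant : String) (width : Int) (height : Int) (grid : List String) : Prop :=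
  ∀ p ∈ garden, ∀ d ∈ ([(1, 0), (-1, 0), (0, 1), (0, -1)] : List (Int × Int)),
    (0 ≤ p.1 + d.1 ∧ 0 ≤ p.2 + d.2 ∧ p.1 + d.1 < width ∧ p.2 + d.2 < height) →
    (p.2 + d.2 < (grid.length : Int) ∧
     p.1 + d.1 < (((grid.getD (p.2 + d.2).toNat "").toList.length : Int)))
instance (garden : List (Int × Int)) (plant : String) (width : Int) (height : Int) (grid : List String) : Decidable (Pre_compute_face_angles garden plant width height grid) := by unfold Pre_compute_face_angles; infer_instance
def pvWitness_compute_face_angles : (List (Int × Int)) × String × Int × Int × List String :=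
  ([(0, 0), (1, 0)], "a", 2, 1, ["ab"])
def Spec_compute_face_angles (garden : List (Int × Int)) (plant : String) (width : Int) (height : Int) (grid : List String) (out : List (List Bool)) : Prop := out = compute_face_angles_alt garden plant width height grid
instance (garden : List (Int × Int)) (plant : String) (width : Int) (height : Int) (grid : List String) (out : List (List Bool)) : Decidable (Spec_compute_face_angles garden plant width height grid out) := by unfold Spec_compute_face_angles; infer_instance

-- ===== CLAIM (what is proved, stated in full; the proofs are below) =====
def Claim_equal_compute_face_angles : Prop := ∀ (garden : List (Int × Int)) (plant : String) (width : Int) (height : Int) (grid : List String), Dom_compute_face_angles garden plant width height grid → Pre_compute_face_angles garden plant width height grid → Spec_compute_face_angles garden plant width height grid (compute_face_angles garden plant width height grid)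

-- ===== LEMMAS AND PROOFS =====

-- the boolean A computes for one position and one direction
def pvAVal (plant : String) (width height : Int) (grid : List String) (x y : Int) (d : Int × Int) : Bool :=
  if x + d.1 < 0 ∨ y + d.2 < 0 ∨ x + d.1 ≥ width ∨ y + d.2 ≥ height then true
  else
    match PySem.List.pyGet? grid (y + d.2) with
    | none => false
    | some row =>
      match PySem.Str.pyGet? row (x + d.1) with
      | none => false
      | some c => if [c] ≠ plant.toList then true else false

theorem pv_step_eq (plant : String) (width height : Int) (grid : List String) (x y : Int)
    (pa : List Bool) (i : Int) :
    (fun pa i =>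
        let dir := PySem.List.pyGetD ([(1, 0), (-1, 0), (0, 1), (0, -1)] : List (Int × Int)) i (0, 0)
        if x + dir.1 < 0 ∨ y + dir.2 < 0 ∨ x + dir.1 ≥ width ∨ y + dir.2 ≥ height then
          PySem.List.pySetD pa i true
        else
          match PySem.List.pyGet? grid (y + dir.2) with
          | none => pa
          | some row =>
            match PySem.Str.pyGet? row (x + dir.1) with
            | none => pa
            | some c => if [c] ≠ plant.toList then PySem.List.pySetD pa i true else pa) pa i
    = cond (pvAVal plant width height grid x y
        (PySem.List.pyGetD ([(1, 0), (-1, 0), (0, 1), (0, -1)] : List (Int × Int)) i (0, 0)))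
        (PySem.List.pySetD pa i true) pa := by
  simp only [pvAVal]
  split
  · simp
  · cases hrow : PySem.List.pyGet? grid (y + (PySem.List.pyGetD ([(1, 0), (-1, 0), (0, 1), (0, -1)] : List (Int × Int)) i (0, 0)).2) with
    | none => simp
    | some row =>
      cases hc : PySem.List.pyGet? row.toList (x + (PySem.List.pyGetD ([(1, 0), (-1, 0), (0, 1), (0, -1)] : List (Int × Int)) i (0, 0)).1) with
      | none => simp [hc]
      | some c => by_cases hp : [c] = plant.toList <;> simp [hc, hp]

-- the list B's set comprehension generates, and what membership in it means
def pvGen (plant : String) (width height : Int) (grid : List String) : List (Int × Int) :=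
  (PySem.List.pyRange 0 (min height (PySem.List.len grid)) 1).flatMap (fun y =>
    (PySem.List.pyRange 0 (min width (PySem.Str.len (PySem.List.pyGetD grid y ""))) 1).filterMap (fun x =>
      if [PySem.List.pyGetD (PySem.List.pyGetD grid y "").toList x ' '] = plant.toList then some (x, y) else none))

theorem pv_mem_gen (plant : String) (width height : Int) (grid : List String) (u v : Int) :
    (u, v) ∈ pvGen plant width height grid ↔
      (0 ≤ v ∧ v < min height (grid.length : Int) ∧ 0 ≤ u ∧
       u < min width (((grid.getD v.toNat "").toList.length : Int)) ∧
       [(grid.getD v.toNat "").toList.getD u.toNat ' '] = plant.toList) := by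
  unfold pvGen
  simp only [List.mem_flatMap, List.mem_filterMap, PySem.List.mem_pyRange_one]
  constructor
  · rintro ⟨y, ⟨hy0, hy1⟩, x, ⟨⟨hx0, hx1⟩, hif⟩⟩
    split at hif
    · rename_i hchar
      obtain ⟨hxu, hyv⟩ := Prod.mk.injEq .. ▸ (Option.some.injEq .. ▸ hif)
      subst hxu; subst hyv
      rw [PySem.List.pyGetD_of_nonneg _ _ hy0] at hx1 hchar
      simp only [PySem.List.len_eq, PySem.Str.len_eq] at hy1 hx1
      exact ⟨hy0, by omega, hx0, by omega,
        by rwa [PySem.List.pyGetD_of_nonneg _ _ hx0] at hchar⟩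
    · exact absurd hif (by simp)
  · rintro ⟨hv0, hv1, hu0, hu1, hchar⟩
    refine ⟨v, ⟨hv0, by simp only [PySem.List.len_eq]; omega⟩, u, ⟨⟨hu0, ?_⟩, ?_⟩⟩
    · rw [PySem.List.pyGetD_of_nonneg _ _ hv0]
      simp only [PySem.Str.len_eq]; omega
    · rw [PySem.List.pyGetD_of_nonneg _ _ hv0, if_pos]
      rwa [PySem.List.pyGetD_of_nonneg _ _ hu0]

-- membership in a translated copy of the plant set
theorem pv_mem_shift (cells : List (Int × Int)) (d : Int × Int) (p : Int × Int) :
    (p ∈ PySem.Set.ofList (cells.map (fun c => (c.1 - d.1, c.2 - d.2)))) ↔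
      (p.1 + d.1, p.2 + d.2) ∈ cells := by
  rw [PySem.Set.mem_ofList, List.mem_map]
  constructor
  · rintro ⟨c, hc, rfl⟩
    simpa using hc
  · intro h
    exact ⟨(p.1 + d.1, p.2 + d.2), h, by simp⟩

-- B's per-direction boolean equals A's
theorem pv_val_eq (plant : String) (width height : Int) (grid : List String) (x y : Int) (d : Int × Int)
    (hpre : (0 ≤ x + d.1 ∧ 0 ≤ y + d.2 ∧ x + d.1 < width ∧ y + d.2 < height) →
      (y + d.2 < (grid.length : Int) ∧ x + d.1 < (((grid.getD (y + d.2).toNat "").toList.length : Int)))) :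
    (!(PySem.Set.contains
        (PySem.Set.ofList ((PySem.Set.ofList (pvGen plant width height grid)).map
          (fun c => (c.1 - d.1, c.2 - d.2)))) (x, y)))
    = pvAVal plant width height grid x y d := by
  have hmem : (PySem.Set.contains
      (PySem.Set.ofList ((PySem.Set.ofList (pvGen plant width height grid)).map
        (fun c => (c.1 - d.1, c.2 - d.2)))) (x, y)) =
      decide ((x + d.1, y + d.2) ∈ pvGen plant width height grid) := by
    simp only [PySem.Set.contains_eq_listContains, List.contains_eq_mem, decide_eq_decide]
    rw [pv_mem_shift]
    exact PySem.Set.mem_ofList ..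
  rw [hmem]
  by_cases hout : x + d.1 < 0 ∨ y + d.2 < 0 ∨ x + d.1 ≥ width ∨ y + d.2 ≥ height
  · have : ¬ (x + d.1, y + d.2) ∈ pvGen plant width height grid := by
      rw [pv_mem_gen]; omega
    unfold pvAVal
    rw [if_pos hout]
    simp [this]
  · have ho1 : 0 ≤ x + d.1 := by omega
    have ho2 : 0 ≤ y + d.2 := by omega
    have ho3 : x + d.1 < width := by omega
    have ho4 : y + d.2 < height := by omega
    obtain ⟨hg, hr⟩ := hpre ⟨ho1, ho2, ho3, ho4⟩
    have hvnat : (y + d.2).toNat < grid.length := by omega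
    have hgetD : grid.getD (y + d.2).toNat "" = grid[(y + d.2).toNat] :=
      List.getD_eq_getElem grid "" hvnat
    unfold pvAVal
    rw [if_neg (by rintro (h | h | h | h) <;> omega)]
    rw [hgetD] at hr
    have hrow : PySem.List.pyGet? (grid[(y + d.2).toNat]).toList (x + d.1)
        = some ((grid[(y + d.2).toNat]).toList[(x + d.1).toNat]) :=
      PySem.List.pyGet?_eq_some_getElem _ ho1 (by exact_mod_cast hr)
    simp only [PySem.List.pyGet?_eq_some_getElem grid ho2 hg, PySem.Str.pyGet?_eq,
      PySem.Chars.pyGet?_eq_listPyGet?, hrow]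
    have hmemiff : (x + d.1, y + d.2) ∈ pvGen plant width height grid ↔
        [(grid[(y + d.2).toNat]).toList[(x + d.1).toNat]] = plant.toList := by
      rw [pv_mem_gen, hgetD]
      constructor
      · rintro ⟨-, -, -, -, hc⟩
        rwa [List.getD_eq_getElem _ _ (by omega)] at hc
      · intro hc
        refine ⟨ho2, by omega, ho1, by omega, ?_⟩
        rwa [List.getD_eq_getElem _ _ (by omega)]
    by_cases hp : [(grid[(y + d.2).toNat]).toList[(x + d.1).toNat]] = plant.toList
    · simp [hp, hmemiff.mpr hp]
    · have hnot : (x + d.1, y + d.2) ∉ pvGen plant width height grid := fun h => hp (hmemiff.mp h)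
      simp [hp, hnot]

-- A's four-step inner loop, written out
theorem pv_innerA (plant : String) (width height : Int) (grid : List String) (x y : Int) :
    (([0, 1, 2, 3] : List Int).foldl (fun pa i =>
      cond (pvAVal plant width height grid x y
          (PySem.List.pyGetD ([(1, 0), (-1, 0), (0, 1), (0, -1)] : List (Int × Int)) i (0, 0)))
        (PySem.List.pySetD pa i true) pa) [false, false, false, false])
    = [pvAVal plant width height grid x y (1, 0), pvAVal plant width height grid x y (-1, 0),
       pvAVal plant width height grid x y (0, 1), pvAVal plant width height grid x y (0, -1)] := by
  have d0 : PySem.List.pyGetD ([(1, 0), (-1, 0), (0, 1), (0, -1)] : List (Int × Int)) 0 (0, 0) = (1, 0) := by decide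
  have d1 : PySem.List.pyGetD ([(1, 0), (-1, 0), (0, 1), (0, -1)] : List (Int × Int)) 1 (0, 0) = (-1, 0) := by decide
  have d2 : PySem.List.pyGetD ([(1, 0), (-1, 0), (0, 1), (0, -1)] : List (Int × Int)) 2 (0, 0) = (0, 1) := by decide
  have d3 : PySem.List.pyGetD ([(1, 0), (-1, 0), (0, 1), (0, -1)] : List (Int × Int)) 3 (0, 0) = (0, -1) := by decide
  simp only [List.foldl_cons, List.foldl_nil, d0, d1, d2, d3]
  cases h0 : pvAVal plant width height grid x y (1, 0) <;>
    cases h1 : pvAVal plant width height grid x y (-1, 0) <;>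
      cases h2 : pvAVal plant width height grid x y (0, 1) <;>
        cases h3 : pvAVal plant width height grid x y (0, -1) <;>
          decide

-- append-accumulate fold is map
theorem pv_foldl_append {A B : Type} (g : A → B) (l : List A) :
    ∀ acc : List B, l.foldl (fun a x => a ++ [g x]) acc = acc ++ l.map g := by
  induction l with
  | nil => simp
  | cons x xs ih => intro acc; simp [ih]

-- ===== VERDICT (by name: the statement is the Claim_ definition above) =====
theorem compute_face_angles_spec : Claim_equal_compute_face_angles := by
  intro garden plant width height grid hdom hpre
  unfold Spec_compute_face_angles
  show compute_face_angles garden plant width height grid =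
    compute_face_angles_alt garden plant width height grid
  unfold compute_face_angles compute_face_angles_alt
  rw [pv_foldl_append]
  simp only [List.nil_append, List.map_map]
  refine List.map_congr_left fun pos hpos => ?_
  have hr4 : PySem.List.pyRange 0 (PySem.List.len ([(1, 0), (-1, 0), (0, 1), (0, -1)] : List (Int × Int))) 1 = ([0, 1, 2, 3] : List Int) := by decide
  rw [hr4]
  refine Eq.trans (List.foldl_ext _
      (fun pa i => cond (pvAVal plant width height grid pos.1 pos.2
          (PySem.List.pyGetD ([(1, 0), (-1, 0), (0, 1), (0, -1)] : List (Int × Int)) i (0, 0)))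
        (PySem.List.pySetD pa i true) pa)
      [false, false, false, false]
      (fun pa i _ => pv_step_eq plant width height grid pos.1 pos.2 pa i)) ?_
  rw [pv_innerA]
  simp only [List.map_cons, List.map_nil, Function.comp]
  rw [← pv_val_eq plant width height grid pos.1 pos.2 (1, 0) (hpre pos hpos (1, 0) (by decide)),
     ← pv_val_eq plant width height grid pos.1 pos.2 (-1, 0) (hpre pos hpos (-1, 0) (by decide)),
     ← pv_val_eq plant width height grid pos.1 pos.2 (0, 1) (hpre pos hpos (0, 1) (by decide)),
     ← pv_val_eq plant width height grid pos.1 pos.2 (0, -1) (hpre pos hpos (0, -1) (by decide))]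
  rfl
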